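-- pv_equiv track=rewrite | github.com/jaderbelarmino/classroomPythonSql | Assignment1_Q1.py | addToQueue
-- ===== SOURCE A (Python) =====
-- def addToQueue(queue, element):
--     stack1 = []
--     for e in range(len(queue)):
--         stack1.append(queue.pop())
--     queue.append(element)
--     for e in range(len(stack1)):
--         queue.append(stack1.pop())
--
--     return queue
-- ===== SOURCE B (Python) =====
-- def addToQueue(queue, element):
--     queue.insert(0, element)
--     return queue
-- ===== Notes on version B (the rewrite author's own statement) =====
-- stated objective: simpler
-- what changed: Replaces the auxiliary stack and two reversing pop/append loops with a single in-place front insertion queue.insert(0, element) on the same list object.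
import Mathlib
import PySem

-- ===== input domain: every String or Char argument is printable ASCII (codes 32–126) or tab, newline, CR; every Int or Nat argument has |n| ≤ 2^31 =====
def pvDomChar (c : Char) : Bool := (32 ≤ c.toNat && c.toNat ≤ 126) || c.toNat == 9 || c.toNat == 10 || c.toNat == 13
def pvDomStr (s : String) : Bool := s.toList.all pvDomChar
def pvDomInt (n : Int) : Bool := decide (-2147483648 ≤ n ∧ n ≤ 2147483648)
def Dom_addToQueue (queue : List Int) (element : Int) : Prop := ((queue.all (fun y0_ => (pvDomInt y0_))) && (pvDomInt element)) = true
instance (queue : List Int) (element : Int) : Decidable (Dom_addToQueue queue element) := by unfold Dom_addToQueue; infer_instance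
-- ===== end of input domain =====

-- B replaces A's auxiliary stack and two pop/append loops by a single front insertion
-- (queue.insert(0, element)); in Python B mutates the same list object A mutates, and
-- the equivalence proved here is about the returned value.

-- ===== PORT A =====
-- one iteration of A's first loop: stack1.append(queue.pop())
def pvStep1 (st : List Int × List Int) : List Int × List Int :=
  match PySem.List.pop? st.1 (-1) with
  | some (x, q') => (q', st.2 ++ [x])
  | none => st

-- one iteration of A's second loop: queue.append(stack1.pop())
def pvStep2 (st : List Int × List Int) : List Int × List Int :=
  match PySem.List.pop? st.2 (-1) with
  | some (x, s') => (st.1 ++ [x], s')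
  | none => st

def addToQueue (queue : List Int) (element : Int) : List Int :=
  let st1 := (PySem.List.pyRange 0 queue.length 1).foldl (fun st _ => pvStep1 st) (queue, ([] : List Int))
  let q2 := st1.1 ++ [element]
  let st2 := (PySem.List.pyRange 0 st1.2.length 1).foldl (fun st _ => pvStep2 st) (q2, st1.2)
  st2.1

-- ===== PORT B =====
def addToQueue_alt (queue : List Int) (element : Int) : List Int :=
  PySem.List.insert queue 0 element

-- ===== PRECONDITION & SPEC =====
def Spec_addToQueue (queue : List Int) (element : Int) (out : List Int) : Prop := out = addToQueue_alt queue element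
instance (queue : List Int) (element : Int) (out : List Int) : Decidable (Spec_addToQueue queue element out) := by unfold Spec_addToQueue; infer_instance

-- ===== CLAIM (what is proved, stated in full; the proofs are below) =====
def Claim_equal_addToQueue : Prop := ∀ (queue : List Int) (element : Int), Dom_addToQueue queue element → Spec_addToQueue queue element (addToQueue queue element)

-- ===== LEMMAS AND PROOFS =====

theorem pvFoldl_const {α β : Type} (f : β → β) : ∀ (l : List α) (st : β), l.foldl (fun s _ => f s) st = f^[l.length] st := by
  intro l
  induction l with
  | nil => intro st; rfl
  | cons x xs ih => intro st; simp [List.foldl, ih, Function.iterate_succ_apply]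

theorem pvStep1_iter : ∀ (q s : List Int), pvStep1^[q.length] (q, s) = ([], s ++ q.reverse) := by
  intro q
  induction q using List.reverseRecOn with
  | nil => intro s; simp
  | append_singleton xs x ih =>
      intro s
      have h1 : pvStep1 (xs ++ [x], s) = (xs, s ++ [x]) := by
        simp [pvStep1, PySem.List.pop?_last]
      rw [List.length_append, List.length_singleton, Function.iterate_succ_apply, h1, ih]
      simp

theorem pvStep2_iter : ∀ (s q : List Int), pvStep2^[s.length] (q, s) = (q ++ s.reverse, []) := by
  intro s
  induction s using List.reverseRecOn with
  | nil => intro q; simp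
  | append_singleton xs x ih =>
      intro q
      have h1 : pvStep2 (q, xs ++ [x]) = (q ++ [x], xs) := by
        simp [pvStep2, PySem.List.pop?_last]
      rw [List.length_append, List.length_singleton, Function.iterate_succ_apply, h1, ih]
      simp

-- ===== VERDICT (by name: the statement is the Claim_ definition above) =====
theorem addToQueue_spec : Claim_equal_addToQueue := by
  intro queue element _
  unfold Spec_addToQueue addToQueue addToQueue_alt
  have hlen : (PySem.List.pyRange 0 (queue.length : Int) 1).length = queue.length := by
    simp [PySem.List.length_pyRange_one]
  rw [pvFoldl_const, hlen, pvStep1_iter]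
  simp only [List.nil_append, List.length_reverse]
  have hlen2 : (PySem.List.pyRange 0 ((queue.reverse).length : Int) 1).length = queue.length := by
    simp [PySem.List.length_pyRange_one]
  rw [pvFoldl_const]
  simp only [List.length_reverse] at hlen2 ⊢
  have h3 := pvStep2_iter queue.reverse [element]
  simp only [List.length_reverse, List.reverse_reverse] at h3
  rw [hlen2, h3]
  simp [PySem.List.insert_zero]
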